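-- pv_equiv track=rewrite | github.com/borgdev/anant | anant/utils/incidence_patterns.py | _compute_path_lengths
-- ===== SOURCE A (Python) =====
-- from typing import Dict, List, Tuple, Any, Optional, Union, Set
-- from collections import defaultdict, Counter
--
-- def _compute_path_lengths(
--
--     node_to_edges: Dict[Any, Set[Any]],
--     edge_to_nodes: Dict[Any, Set[Any]]
-- ) -> Counter:
--     """Compute distribution of shortest path lengths"""
--     # Simplified implementation using BFS
--     path_lengths = []
--     nodes = list(node_to_edges.keys())
--
--     # Sample a subset for efficiency
--     sample_size = min(10, len(nodes))
--     sample_nodes = nodes[:sample_size]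
--
--     for start_node in sample_nodes:
--         visited = {start_node}
--         current_level = {start_node}
--         distance = 0
--
--         while current_level and distance < 6:  # Limit search depth
--             next_level = set()
--             for node in current_level:
--                 # Find neighbors through shared edges
--                 for edge in node_to_edges[node]:
--                     for neighbor in edge_to_nodes[edge]:
--                         if neighbor not in visited:
--                             visited.add(neighbor)
--                             next_level.add(neighbor)
--                             path_lengths.append(distance + 1)
--
--             current_level = next_level
--             distance += 1
--
--     return Counter(path_lengths)
-- ===== SOURCE B (Python) =====
-- from typing import Dict, List, Tuple, Any, Optional, Union, Set
-- from collections import Counter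
--
-- def _compute_path_lengths(
--     node_to_edges: Dict[Any, Set[Any]],
--     edge_to_nodes: Dict[Any, Set[Any]]
-- ) -> Counter:
--     """Distribution of shortest path lengths via 6 rounds of Bellman-Ford-style
--     relaxation of a distance map (no frontier/queue BFS)."""
--     lengths = []
--     for start in list(node_to_edges.keys())[:10]:
--         dist = {start: 0}
--         for _ in range(6):
--             new = dict(dist)
--             for node, d in dist.items():
--                 for edge in node_to_edges[node]:
--                     for nb in edge_to_nodes[edge]:
--                         if nb not in new or d + 1 < new[nb]:
--                             new[nb] = d + 1
--             dist = new
--         lengths.extend(d for d in dist.values() if d)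
--     return Counter(lengths)
-- ===== Notes on version B (the rewrite author's own statement) =====
-- stated objective: alternative
-- what changed: Replaces the frontier BFS (visited set + current/next level sets, appending a path length at each discovery) by a Bellman-Ford-style algorithm: six synchronous relaxation rounds over a node-to-distance map (each round rescans every labelled node and relaxes its neighbours' labels), after which the nonzero distance labels are tallied into the Counter.
import Mathlib
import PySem

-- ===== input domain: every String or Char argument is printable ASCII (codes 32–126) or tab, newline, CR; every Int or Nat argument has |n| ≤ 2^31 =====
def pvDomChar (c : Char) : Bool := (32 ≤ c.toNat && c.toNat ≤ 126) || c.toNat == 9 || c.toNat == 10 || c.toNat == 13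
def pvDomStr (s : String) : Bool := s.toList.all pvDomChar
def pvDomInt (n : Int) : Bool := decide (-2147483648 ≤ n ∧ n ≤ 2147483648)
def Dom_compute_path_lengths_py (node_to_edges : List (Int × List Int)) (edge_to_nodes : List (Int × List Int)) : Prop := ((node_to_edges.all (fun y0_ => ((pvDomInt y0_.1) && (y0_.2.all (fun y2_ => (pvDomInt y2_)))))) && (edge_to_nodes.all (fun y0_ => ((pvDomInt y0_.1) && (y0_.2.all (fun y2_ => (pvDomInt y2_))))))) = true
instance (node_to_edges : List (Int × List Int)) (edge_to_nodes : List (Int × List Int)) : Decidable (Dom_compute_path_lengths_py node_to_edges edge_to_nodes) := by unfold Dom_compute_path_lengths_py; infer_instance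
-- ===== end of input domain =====

-- B replaces A's frontier BFS (visited + current/next level sets, appending a path length at
-- each discovery) by six synchronous Bellman-Ford-style relaxation rounds over a distance map,
-- tallying the nonzero distance labels at the end (alternative algorithm, similar cost).

-- ===== PORT A =====
-- innermost step of A's triple loop: 'if neighbor not in visited: visited.add; next_level.add; path_lengths.append(distance+1)'
def pvA_step (d : Int) (st : PySem.Set Int × PySem.Set Int × List Int) (neighbor : Int) :
    PySem.Set Int × PySem.Set Int × List Int :=
  if PySem.Set.contains st.1 neighbor then st
  else (PySem.Set.add st.1 neighbor, PySem.Set.add st.2.1 neighbor, st.2.2 ++ [d + 1])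

-- 'for edge in node_to_edges[node]: for neighbor in edge_to_nodes[edge]: …'
def pvA_node (N E : PySem.Dict Int (List Int)) (d : Int)
    (st : PySem.Set Int × PySem.Set Int × List Int) (node : Int) :
    PySem.Set Int × PySem.Set Int × List Int :=
  (N.getD node []).foldl (fun st edge => (E.getD edge []).foldl (pvA_step d) st) st

-- 'while current_level and distance < 6: …'
def pvA_loop (N E : PySem.Dict Int (List Int)) (visited current : PySem.Set Int)
    (distance : Int) (acc : List Int) : List Int :=
  if h : current ≠ [] ∧ distance < 6 then
    let st := current.foldl (pvA_node N E distance) (visited, (PySem.Set.empty : PySem.Set Int), acc)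
    pvA_loop N E st.1 st.2.1 (distance + 1) st.2.2
  else acc
termination_by (6 - distance).toNat
decreasing_by omega

def compute_path_lengths_py (node_to_edges : List (Int × List Int)) (edge_to_nodes : List (Int × List Int)) : List (Int × Int) :=
  let N := PySem.Dict.mk node_to_edges
  let E := PySem.Dict.mk edge_to_nodes
  let nodes := N.keys
  let sample_size : Int := min 10 (PySem.List.len nodes)
  let sample_nodes := PySem.List.slice nodes none (some sample_size)
  let path_lengths := sample_nodes.foldl (fun acc start_node => pvA_loop N E [start_node] [start_node] 0 acc) []
  (PySem.Dict.counter path_lengths).items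

-- ===== PORT B =====
-- 'if nb not in new or d + 1 < new[nb]: new[nb] = d + 1'  (new[nb] read only when present)
def pvB_relax (d : Int) (new : PySem.Dict Int Int) (nb : Int) : PySem.Dict Int Int :=
  match new.get? nb with
  | none => new.insert nb (d + 1)
  | some v => if d + 1 < v then new.insert nb (d + 1) else new

-- one item of the round's scan: 'for edge in node_to_edges[node]: for nb in edge_to_nodes[edge]: …'
def pvB_entry (N E : PySem.Dict Int (List Int)) (new : PySem.Dict Int Int) (e : Int × Int) :
    PySem.Dict Int Int :=
  (N.getD e.1 []).foldl (fun new edge => (E.getD edge []).foldl (pvB_relax e.2) new) new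

-- one relaxation round: 'new = dict(dist); for node, d in dist.items(): …; dist = new'
def pvB_round (N E : PySem.Dict Int (List Int)) (dist : PySem.Dict Int Int) : PySem.Dict Int Int :=
  dist.items.foldl (pvB_entry N E) dist

-- per start node: 'dist = {start: 0}; for _ in range(6): …; (d for d in dist.values() if d)'
def pvB_start (N E : PySem.Dict Int (List Int)) (start : Int) : List Int :=
  let dist := (List.range 6).foldl (fun D _ => pvB_round N E D) (PySem.Dict.mk [(start, 0)])
  dist.values.filter (fun d => d != 0)

def compute_path_lengths_py_alt (node_to_edges : List (Int × List Int)) (edge_to_nodes : List (Int × List Int)) : List (Int × Int) :=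
  let N := PySem.Dict.mk node_to_edges
  let E := PySem.Dict.mk edge_to_nodes
  let lengths := (PySem.List.slice N.keys none (some 10)).foldl
    (fun acc start => acc ++ pvB_start N E start) []
  (PySem.Dict.counter lengths).items

-- ===== PRECONDITION & SPEC =====
-- Pre_ excludes inputs on which a dangling reference can make A's BFS raise KeyError: it requires
-- every edge listed under any node to be a key of edge_to_nodes, and every node listed under a
-- REFERENCED edge (one occurring in some node's edge list) to be a key of node_to_edges.
-- This per-entry condition is slightly stronger than the exact no-KeyError condition, which would
-- depend on bounded reachability from the sampled start nodes: excluded inputs whose dangling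
-- references are never reached (they hang off nodes beyond the 10-node start sample) still
-- return, and A and B return the same value there.
def Pre_compute_path_lengths_py (node_to_edges : List (Int × List Int)) (edge_to_nodes : List (Int × List Int)) : Prop :=
  ((node_to_edges.all (fun p => p.2.all (fun e => (edge_to_nodes.map Prod.fst).contains e))) &&
   (edge_to_nodes.all (fun q =>
      !(node_to_edges.any (fun p => p.2.contains q.1)) ||
      q.2.all (fun m => (node_to_edges.map Prod.fst).contains m)))) = true
instance (node_to_edges : List (Int × List Int)) (edge_to_nodes : List (Int × List Int)) : Decidable (Pre_compute_path_lengths_py node_to_edges edge_to_nodes) := by unfold Pre_compute_path_lengths_py; infer_instance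

def pvWitness_compute_path_lengths_py : (List (Int × List Int)) × (List (Int × List Int)) :=
  ([(1, [10]), (2, [10])], [(10, [1, 2])])

def Spec_compute_path_lengths_py (node_to_edges : List (Int × List Int)) (edge_to_nodes : List (Int × List Int)) (out : List (Int × Int)) : Prop := out = compute_path_lengths_py_alt node_to_edges edge_to_nodes
instance (node_to_edges : List (Int × List Int)) (edge_to_nodes : List (Int × List Int)) (out : List (Int × Int)) : Decidable (Spec_compute_path_lengths_py node_to_edges edge_to_nodes out) := by unfold Spec_compute_path_lengths_py; infer_instance

-- ===== CLAIM (what is proved, stated in full; the proofs are below) =====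
def Claim_equal_compute_path_lengths_py : Prop := ∀ (node_to_edges : List (Int × List Int)) (edge_to_nodes : List (Int × List Int)), Dom_compute_path_lengths_py node_to_edges edge_to_nodes → Pre_compute_path_lengths_py node_to_edges edge_to_nodes → Spec_compute_path_lengths_py node_to_edges edge_to_nodes (compute_path_lengths_py node_to_edges edge_to_nodes)

-- ===== LEMMAS AND PROOFS =====

-- ---- discovery lists: the ordered list of new nodes a scan of a neighbor list contributes ----
def pvDStep (p : List Int × List Int) (nb : Int) : List Int × List Int :=
  if PySem.Set.contains p.1 nb then p else (p.1 ++ [nb], p.2 ++ [nb])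

def pvNews (l : List Int) (v : List Int) : List Int := (l.foldl pvDStep (v, [])).2

def pvNbrs (N E : PySem.Dict Int (List Int)) (node : Int) : List Int :=
  (N.getD node []).flatMap (fun e => E.getD e [])

def pvDisc (N E : PySem.Dict Int (List Int)) (v : List Int) (node : Int) : List Int :=
  pvNews (pvNbrs N E node) v

-- ordered list of new nodes one whole level C contributes, visited list V growing along the way
def pvLNews (N E : PySem.Dict Int (List Int)) (V : List Int) : List Int → List Int
  | [] => []
  | x :: C => pvDisc N E V x ++ pvLNews N E (V ++ pvDisc N E V x) C

-- ghost run of the levels: the (node, depth) pairs appended over k levels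
def pvPRuns (N E : PySem.Dict Int (List Int)) : Nat → List Int → List Int → Int → List (Int × Int)
  | 0, _, _, _ => []
  | k + 1, V, C, r =>
    (pvLNews N E V C).map (fun n => (n, r + 1))
      ++ pvPRuns N E k (V ++ pvLNews N E V C) (pvLNews N E V C) (r + 1)

lemma pvFoldNested {α β γ : Type} (f : γ → β → γ) (g : α → List β) (l : List α) :
    ∀ st : γ, l.foldl (fun st a => (g a).foldl f st) st = (l.flatMap g).foldl f st := by
  induction l with
  | nil => intro st; rfl
  | cons a l ih => intro st; simp [List.flatMap_cons, List.foldl_append, ih]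

lemma pvDStep_fold (l : List Int) :
    ∀ v s, l.foldl pvDStep (v, s) = (v ++ pvNews l v, s ++ pvNews l v) := by
  induction l with
  | nil => intro v s; simp [pvNews]
  | cons nb l ih =>
    intro v s
    simp only [List.foldl_cons]
    by_cases hm : nb ∈ v
    · have hstep : pvDStep (v, s) nb = (v, s) := by simp [pvDStep, hm]
      have hnews : pvNews (nb :: l) v = pvNews l v := by
        simp [pvNews, List.foldl_cons, pvDStep, hm]
      rw [hstep, hnews, ih]
    · have hstep : pvDStep (v, s) nb = (v ++ [nb], s ++ [nb]) := by simp [pvDStep, hm]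
      have hnews : pvNews (nb :: l) v = nb :: pvNews l (v ++ [nb]) := by
        have hstep0 : pvDStep (v, []) nb = (v ++ [nb], [nb]) := by simp [pvDStep, hm]
        simp [pvNews, List.foldl_cons, hstep0, ih (v ++ [nb]) [nb]]
      rw [hstep, hnews, ih]
      simp

lemma pvNews_cons_mem {nb : Int} {v : List Int} (l : List Int) (hm : nb ∈ v) :
    pvNews (nb :: l) v = pvNews l v := by
  simp [pvNews, List.foldl_cons, pvDStep, hm]

lemma pvNews_cons_not_mem {nb : Int} {v : List Int} (l : List Int) (hm : nb ∉ v) :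
    pvNews (nb :: l) v = nb :: pvNews l (v ++ [nb]) := by
  have hstep0 : pvDStep (v, []) nb = (v ++ [nb], [nb]) := by simp [pvDStep, hm]
  simp [pvNews, List.foldl_cons, hstep0, pvDStep_fold l (v ++ [nb]) [nb]]

lemma pvNews_covers (l : List Int) :
    ∀ v x, x ∈ l → x ∈ v ++ pvNews l v := by
  induction l with
  | nil => intro v x hx; cases hx
  | cons nb l ih =>
    intro v x hx
    by_cases hm : nb ∈ v
    · rw [pvNews_cons_mem l hm]
      rcases List.mem_cons.mp hx with rfl | hx'
      · exact List.mem_append_left _ hm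
      · exact ih v x hx'
    · rw [pvNews_cons_not_mem l hm]
      rcases List.mem_cons.mp hx with rfl | hx'
      · simp
      · have := ih (v ++ [nb]) x hx'
        simp only [List.mem_append, List.mem_cons] at this ⊢
        tauto

lemma pvNews_nodup (l : List Int) :
    ∀ v : List Int, v.Nodup → (v ++ pvNews l v).Nodup := by
  induction l with
  | nil => intro v hv; simpa [pvNews]
  | cons nb l ih =>
    intro v hv
    by_cases hm : nb ∈ v
    · rw [pvNews_cons_mem l hm]; exact ih v hv
    · rw [pvNews_cons_not_mem l hm]
      have hv' : (v ++ [nb]).Nodup := by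
        simp [List.nodup_append, hv]
        exact fun a ha h => hm (h ▸ ha)
      have := ih (v ++ [nb]) hv'
      simpa [List.append_assoc] using this

lemma pvLNews_covers (N E : PySem.Dict Int (List Int)) (C : List Int) :
    ∀ V u, u ∈ C → ∀ x ∈ pvNbrs N E u, x ∈ V ++ pvLNews N E V C := by
  induction C with
  | nil => intro V u hu; cases hu
  | cons c C ih =>
    intro V u hu x hx
    rcases List.mem_cons.mp hu with rfl | hu'
    · have h1 : x ∈ V ++ pvDisc N E V u := pvNews_covers (pvNbrs N E u) V x hx
      simp only [pvLNews, List.mem_append] at h1 ⊢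
      tauto
    · have := ih (V ++ pvDisc N E V c) u hu' x hx
      simp only [pvLNews, List.mem_append] at this ⊢
      tauto

lemma pvLNews_nodup (N E : PySem.Dict Int (List Int)) (C : List Int) :
    ∀ V : List Int, V.Nodup → (V ++ pvLNews N E V C).Nodup := by
  induction C with
  | nil => intro V hV; simpa [pvLNews]
  | cons c C ih =>
    intro V hV
    have h1 : (V ++ pvDisc N E V c).Nodup := pvNews_nodup (pvNbrs N E c) V hV
    have := ih (V ++ pvDisc N E V c) h1
    simpa [pvLNews, List.append_assoc] using this

-- ---- A side: the level fold and the while loop produce the ghost run ----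
lemma pvA_nb (d : Int) (l : List Int) :
    ∀ (v nx : PySem.Set Int) (acc : List Int), (∀ x ∈ nx, x ∈ v) →
      l.foldl (pvA_step d) (v, nx, acc)
        = (v ++ pvNews l v, nx ++ pvNews l v, acc ++ List.replicate (pvNews l v).length (d + 1)) := by
  induction l with
  | nil => intro v nx acc _; simp [pvNews]
  | cons nb l ih =>
    intro v nx acc hsub
    simp only [List.foldl_cons]
    by_cases hm : nb ∈ v
    · have hstep : pvA_step d (v, nx, acc) nb = (v, nx, acc) := by simp [pvA_step, hm]
      rw [hstep, pvNews_cons_mem l hm, ih v nx acc hsub]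
    · have hnbx : nb ∉ nx := fun hv => hm (hsub nb hv)
      have hstep : pvA_step d (v, nx, acc) nb = (v ++ [nb], nx ++ [nb], acc ++ [d + 1]) := by
        simp [pvA_step, hm, PySem.Set.add_of_not_mem hnbx]
      have hsub' : ∀ x ∈ nx ++ [nb], x ∈ v ++ [nb] := by
        intro x hx
        rcases List.mem_append.mp hx with hx' | hx'
        · exact List.mem_append_left _ (hsub x hx')
        · exact List.mem_append_right _ hx'
      rw [hstep, ih (v ++ [nb]) (nx ++ [nb]) (acc ++ [d + 1]) hsub', pvNews_cons_not_mem l hm]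
      simp [List.replicate_succ]

lemma pvA_node_spec (N E : PySem.Dict Int (List Int)) (d : Int)
    (v nx : PySem.Set Int) (acc : List Int) (node : Int) (hsub : ∀ x ∈ nx, x ∈ v) :
    pvA_node N E d (v, nx, acc) node
      = (v ++ pvDisc N E v node, nx ++ pvDisc N E v node,
         acc ++ List.replicate (pvDisc N E v node).length (d + 1)) := by
  unfold pvA_node pvDisc
  rw [pvFoldNested (pvA_step d) (fun e => E.getD e []) (N.getD node []) (v, nx, acc)]
  exact pvA_nb d (pvNbrs N E node) v nx acc hsub

lemma pvA_level (N E : PySem.Dict Int (List Int)) (d : Int) (C : List Int) :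
    ∀ (V nx : PySem.Set Int) (acc : List Int), (∀ x ∈ nx, x ∈ V) →
      C.foldl (pvA_node N E d) (V, nx, acc)
        = (V ++ pvLNews N E V C, nx ++ pvLNews N E V C,
           acc ++ List.replicate (pvLNews N E V C).length (d + 1)) := by
  induction C with
  | nil => intro V nx acc _; simp [pvLNews]
  | cons c C ih =>
    intro V nx acc hsub
    simp only [List.foldl_cons]
    rw [pvA_node_spec N E d V nx acc c hsub]
    have hsub' : ∀ x ∈ nx ++ pvDisc N E V c, x ∈ V ++ pvDisc N E V c := by
      intro x hx
      rcases List.mem_append.mp hx with hx' | hx'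
      · exact List.mem_append_left _ (hsub x hx')
      · exact List.mem_append_right _ hx'
    rw [ih (V ++ pvDisc N E V c) (nx ++ pvDisc N E V c) _ hsub']
    simp [pvLNews, List.append_assoc, List.replicate_append_replicate]

lemma pvA_loop_step (N E : PySem.Dict Int (List Int)) (v cur : PySem.Set Int) (d : Int)
    (acc : List Int) (h : cur ≠ [] ∧ d < 6) :
    pvA_loop N E v cur d acc
      = pvA_loop N E (cur.foldl (pvA_node N E d) (v, (PySem.Set.empty : PySem.Set Int), acc)).1
          (cur.foldl (pvA_node N E d) (v, (PySem.Set.empty : PySem.Set Int), acc)).2.1 (d + 1)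
          (cur.foldl (pvA_node N E d) (v, (PySem.Set.empty : PySem.Set Int), acc)).2.2 := by
  rw [pvA_loop, dif_pos h]

lemma pvA_loop_stop (N E : PySem.Dict Int (List Int)) (v cur : PySem.Set Int) (d : Int)
    (acc : List Int) (h : ¬(cur ≠ [] ∧ d < 6)) :
    pvA_loop N E v cur d acc = acc := by
  rw [pvA_loop, dif_neg h]

lemma pvPRuns_nilC (N E : PySem.Dict Int (List Int)) :
    ∀ k V r, pvPRuns N E k V [] r = [] := by
  intro k
  induction k with
  | zero => intro V r; rfl
  | succ k ih => intro V r; simp [pvPRuns, pvLNews, ih]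

lemma pvA_loop_runs (N E : PySem.Dict Int (List Int)) :
    ∀ (k : Nat) (V C : List Int) (d : Int) (acc : List Int), (6 - d).toNat = k →
      pvA_loop N E V C d acc = acc ++ (pvPRuns N E k V C d).map Prod.snd := by
  intro k
  induction k with
  | zero =>
    intro V C d acc hk
    rw [pvA_loop_stop N E V C d acc (by omega), pvPRuns]
    simp
  | succ k ih =>
    intro V C d acc hk
    have hd : d < 6 := by omega
    by_cases hC : C = []
    · subst hC
      rw [pvA_loop_stop N E V [] d acc (by simp), pvPRuns_nilC]
      simp
    · rw [pvA_loop_step N E V C d acc ⟨hC, hd⟩,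
          pvA_level N E d C V (PySem.Set.empty : PySem.Set Int) acc (by intro x hx; cases hx)]
      simp only
      rw [ih (V ++ pvLNews N E V C) ((PySem.Set.empty : PySem.Set Int) ++ pvLNews N E V C) (d + 1) _ (by omega)]
      have hemp : ((PySem.Set.empty : PySem.Set Int) ++ pvLNews N E V C) = pvLNews N E V C := by
        simp [PySem.Set.empty]
      rw [hemp, pvPRuns]
      simp only [List.map_append, List.append_assoc]
      congr 1
      simp [Function.comp_def, List.map_const']

-- ---- B side: a relaxation round appends exactly one ghost level ----
lemma pvB_entry_eq (N E : PySem.Dict Int (List Int)) (Q : PySem.Dict Int Int) (e : Int × Int) :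
    pvB_entry N E Q e = (pvNbrs N E e.1).foldl (pvB_relax e.2) Q := by
  unfold pvB_entry pvNbrs
  exact pvFoldNested (pvB_relax e.2) (fun ed => E.getD ed []) (N.getD e.1 []) Q

lemma pvRelax_noop (d : Int) (Q : PySem.Dict Int Int) (nb v : Int)
    (h : Q.get? nb = some v) (hv : v ≤ d + 1) : pvB_relax d Q nb = Q := by
  unfold pvB_relax
  rw [h]
  simp only
  rw [if_neg (by omega)]

lemma pvRelax_fresh (d : Int) (Q : PySem.Dict Int Int) (nb : Int)
    (h : Q.get? nb = none) : pvB_relax d Q nb = Q.insert nb (d + 1) := by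
  unfold pvB_relax
  rw [h]

lemma pvKeysDef (D : PySem.Dict Int Int) : D.keys = D.items.map Prod.fst := rfl

lemma pvValuesDef (D : PySem.Dict Int Int) : D.values = D.items.map Prod.snd := rfl

lemma pvInner (d : Int) (l : List Int) :
    ∀ Q : PySem.Dict Int Int, Q.keys.Nodup → (∀ p ∈ Q.items, p.2 ≤ d + 1) →
      (l.foldl (pvB_relax d) Q).items
        = Q.items ++ (pvNews l Q.keys).map (fun n => (n, d + 1)) := by
  induction l with
  | nil => intro Q hnd hle; simp [pvNews]
  | cons nb l ih =>
    intro Q hnd hle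
    simp only [List.foldl_cons]
    by_cases hm : nb ∈ Q.keys
    · rcases hv : Q.get? nb with _ | v
      · exact absurd hm (by simpa using (PySem.Dict.get?_eq_none_iff_not_mem_keys Q nb).mp hv)
      · have hmem : (nb, v) ∈ Q.items := PySem.Dict.mem_items_of_get?_eq_some Q hv
        have hvle : v ≤ d + 1 := hle (nb, v) hmem
        rw [pvRelax_noop d Q nb v hv hvle, pvNews_cons_mem l hm, ih Q hnd hle]
    · have hnone : Q.get? nb = none := (PySem.Dict.get?_eq_none_iff_not_mem_keys Q nb).mpr hm
      rw [pvRelax_fresh d Q nb hnone]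
      have hcont : Q.contains nb = false := by
        rw [PySem.Dict.contains_eq_isSome_get?, hnone]; rfl
      have hIt : (Q.insert nb (d + 1)).items = Q.items ++ [(nb, d + 1)] :=
        PySem.Dict.items_insert_of_not_contains Q (d + 1) hcont
      have hKeys : (Q.insert nb (d + 1)).keys = Q.keys ++ [nb] := by
        rw [pvKeysDef, hIt, List.map_append, ← pvKeysDef]; rfl
      have hnd' : (Q.insert nb (d + 1)).keys.Nodup := by
        rw [hKeys]
        simp [List.nodup_append, hnd]
        exact fun a ha h => hm (h ▸ ha)
      have hle' : ∀ p ∈ (Q.insert nb (d + 1)).items, p.2 ≤ d + 1 := by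
        rw [hIt]
        intro p hp
        rcases List.mem_append.mp hp with h | h
        · exact hle p h
        · simp at h; subst h; simp
      rw [ih _ hnd' hle', hIt, hKeys, pvNews_cons_not_mem l hm]
      simp [List.append_assoc]

lemma pvInnerNoop (d : Int) (l : List Int) :
    ∀ Q : PySem.Dict Int Int, (∀ nb ∈ l, ∃ v, Q.get? nb = some v ∧ v ≤ d + 1) →
      l.foldl (pvB_relax d) Q = Q := by
  induction l with
  | nil => intro Q _; rfl
  | cons nb l ih =>
    intro Q h
    obtain ⟨v, hv, hvle⟩ := h nb List.mem_cons_self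
    simp only [List.foldl_cons]
    rw [pvRelax_noop d Q nb v hv hvle]
    exact ih Q (fun x hx => h x (List.mem_cons_of_mem _ hx))

lemma pvEntriesNoop (N E : PySem.Dict Int (List Int)) (ES : List (Int × Int)) :
    ∀ Q : PySem.Dict Int Int,
      (∀ e ∈ ES, ∀ nb ∈ pvNbrs N E e.1, ∃ v, Q.get? nb = some v ∧ v ≤ e.2 + 1) →
      ES.foldl (pvB_entry N E) Q = Q := by
  induction ES with
  | nil => intro Q _; rfl
  | cons e ES ih =>
    intro Q h
    simp only [List.foldl_cons]
    rw [pvB_entry_eq, pvInnerNoop e.2 _ Q (h e List.mem_cons_self)]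
    exact ih Q (fun e' he' => h e' (List.mem_cons_of_mem _ he'))

lemma pvEntriesTail (N E : PySem.Dict Int (List Int)) (L : List Int) (r : Int) :
    ∀ Q : PySem.Dict Int Int, Q.keys.Nodup → (∀ p ∈ Q.items, p.2 ≤ r + 1) →
      ((L.map (fun n => (n, r))).foldl (pvB_entry N E) Q).items
        = Q.items ++ (pvLNews N E Q.keys L).map (fun n => (n, r + 1)) := by
  induction L with
  | nil => intro Q _ _; simp [pvLNews]
  | cons x L ih =>
    intro Q hnd hle
    simp only [List.map_cons, List.foldl_cons]
    rw [pvB_entry_eq]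
    simp only
    have hIt1 : ((pvNbrs N E x).foldl (pvB_relax r) Q).items
        = Q.items ++ (pvDisc N E Q.keys x).map (fun n => (n, r + 1)) := pvInner r _ Q hnd hle
    set Q1 := (pvNbrs N E x).foldl (pvB_relax r) Q with hQ1
    have hK1 : Q1.keys = Q.keys ++ pvDisc N E Q.keys x := by
      rw [pvKeysDef, hIt1, List.map_append, ← pvKeysDef, List.map_map]
      simp [Function.comp_def]
    have hnd1 : Q1.keys.Nodup := by
      rw [hK1]; exact pvNews_nodup (pvNbrs N E x) Q.keys hnd
    have hle1 : ∀ p ∈ Q1.items, p.2 ≤ r + 1 := by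
      rw [hIt1]
      intro p hp
      rcases List.mem_append.mp hp with h | h
      · exact hle p h
      · obtain ⟨n, _, rfl⟩ := List.mem_map.mp h; simp
    rw [ih Q1 hnd1 hle1, hIt1, hK1]
    simp [pvLNews, List.append_assoc]

lemma pvRound_spec (N E : PySem.Dict Int (List Int)) (D : PySem.Dict Int Int)
    (P0 : List (Int × Int)) (L : List Int) (r : Int)
    (hI : D.items = P0 ++ L.map (fun n => (n, r)))
    (hset : ∀ e ∈ P0, ∀ nb ∈ pvNbrs N E e.1, ∃ v, D.get? nb = some v ∧ v ≤ e.2 + 1)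
    (hnd : D.keys.Nodup) (hle : ∀ p ∈ D.items, p.2 ≤ r + 1) :
    (pvB_round N E D).items = D.items ++ (pvLNews N E D.keys L).map (fun n => (n, r + 1)) := by
  unfold pvB_round
  conv_lhs => rw [hI]
  rw [List.foldl_append, pvEntriesNoop N E P0 D hset, pvEntriesTail N E L r D hnd hle]

lemma pvRounds (N E : PySem.Dict Int (List Int)) :
    ∀ (ticks : List Nat) (D : PySem.Dict Int Int) (C : List Int) (r : Int),
      (∃ P0, D.items = P0 ++ C.map (fun n => (n, r))
          ∧ ∀ e ∈ P0, ∀ nb ∈ pvNbrs N E e.1, ∃ v, D.get? nb = some v ∧ v ≤ e.2 + 1) →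
      D.keys.Nodup → (∀ p ∈ D.items, p.2 ≤ r) →
      (ticks.foldl (fun D _ => pvB_round N E D) D).items
        = D.items ++ pvPRuns N E ticks.length D.keys C r := by
  intro ticks
  induction ticks with
  | nil => intro D C r _ _ _; simp [pvPRuns]
  | cons t ticks ih =>
    intro D C r hsplit hnd hle
    obtain ⟨P0, hI, hset⟩ := hsplit
    simp only [List.foldl_cons, List.length_cons]
    have hle1 : ∀ p ∈ D.items, p.2 ≤ r + 1 := fun p hp => by have := hle p hp; omega
    have hD' : (pvB_round N E D).items
        = D.items ++ (pvLNews N E D.keys C).map (fun n => (n, r + 1)) :=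
      pvRound_spec N E D P0 C r hI hset hnd hle1
    set news := pvLNews N E D.keys C with hnews
    set D' := pvB_round N E D with hD'def
    have hK' : D'.keys = D.keys ++ news := by
      rw [pvKeysDef, hD', List.map_append, ← pvKeysDef, List.map_map]
      simp [Function.comp_def]
    have hnd' : D'.keys.Nodup := by
      rw [hK', hnews]; exact pvLNews_nodup N E C D.keys hnd
    have hle' : ∀ p ∈ D'.items, p.2 ≤ r + 1 := by
      rw [hD']
      intro p hp
      rcases List.mem_append.mp hp with h | h
      · have := hle p h; omega
      · obtain ⟨n, _, rfl⟩ := List.mem_map.mp h; simp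
    have hget' : ∀ nb v, D.get? nb = some v → D'.get? nb = some v := by
      intro nb v hv
      have hmem : (nb, v) ∈ D'.items := by
        rw [hD']
        exact List.mem_append_left _ (PySem.Dict.mem_items_of_get?_eq_some D hv)
      exact PySem.Dict.get?_of_mem_items D' hmem hnd'
    have hset' : ∀ e ∈ D.items, ∀ nb ∈ pvNbrs N E e.1, ∃ v, D'.get? nb = some v ∧ v ≤ e.2 + 1 := by
      intro e he nb hnb
      rw [hI] at he
      rcases List.mem_append.mp he with he0 | heC
      · obtain ⟨v, hv, hvle⟩ := hset e he0 nb hnb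
        exact ⟨v, hget' nb v hv, hvle⟩
      · obtain ⟨u, huC, rfl⟩ := List.mem_map.mp heC
        have hkey : nb ∈ D'.keys := by
          rw [hK', hnews]
          exact pvLNews_covers N E C D.keys u huC nb hnb
        rcases hv : D'.get? nb with _ | v
        · exact absurd hkey ((PySem.Dict.get?_eq_none_iff_not_mem_keys D' nb).mp hv)
        · have hm : (nb, v) ∈ D'.items := PySem.Dict.mem_items_of_get?_eq_some D' hv
          exact ⟨v, rfl, by simpa using hle' _ hm⟩
    have hIH := ih D' news (r + 1) ⟨D.items, hD', hset'⟩ hnd' hle'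
    rw [hIH, hD', hK']
    rw [pvPRuns]
    simp [List.append_assoc, hnews]

lemma pvPRuns_pos (N E : PySem.Dict Int (List Int)) :
    ∀ (k : Nat) (V C : List Int) (r : Int), 0 ≤ r →
      ∀ p ∈ pvPRuns N E k V C r, p.2 ≠ 0 := by
  intro k
  induction k with
  | zero => intro V C r _ p hp; cases hp
  | succ k ih =>
    intro V C r hr p hp
    rcases List.mem_append.mp hp with h | h
    · obtain ⟨n, _, rfl⟩ := List.mem_map.mp h
      simp; omega
    · exact ih _ _ _ (by omega) p h

lemma pvB_start_runs (N E : PySem.Dict Int (List Int)) (s : Int) :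
    pvB_start N E s = (pvPRuns N E 6 [s] [s] 0).map Prod.snd := by
  have h0 : (PySem.Dict.mk [(s, (0 : Int))]).items = [(s, 0)] := rfl
  have hkeys : (PySem.Dict.mk [(s, (0 : Int))]).keys = [s] := rfl
  have hrounds := pvRounds N E (List.range 6) (PySem.Dict.mk [(s, 0)]) [s] 0
      ⟨[], by simp, by intro e he; cases he⟩
      (by rw [hkeys]; simp)
      (by rw [h0]; intro p hp; simp at hp; simp [hp])
  simp only [List.length_range] at hrounds
  rw [hkeys] at hrounds
  show ((List.range 6).foldl (fun D _ => pvB_round N E D) (PySem.Dict.mk [(s, 0)])).values.filter (fun d => d != 0)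
      = (pvPRuns N E 6 [s] [s] 0).map Prod.snd
  rw [pvValuesDef, hrounds]
  simp only [List.singleton_append, List.map_cons, List.filter_cons]
  norm_num
  intro a x hxa
  have := pvPRuns_pos N E 6 [s] [s] 0 (le_refl 0) (x, a) hxa
  simpa using this

lemma pvFoldStarts (N E : PySem.Dict Int (List Int)) (sample : List Int) :
    ∀ acc : List Int,
      sample.foldl (fun acc start => pvA_loop N E [start] [start] 0 acc) acc
        = sample.foldl (fun acc start => acc ++ pvB_start N E start) acc := by
  have hstart : ∀ (s : Int) (acc : List Int),
      pvA_loop N E [s] [s] 0 acc = acc ++ pvB_start N E s := by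
    intro s acc
    rw [pvB_start_runs, pvA_loop_runs N E 6 [s] [s] 0 acc (by decide)]
  induction sample with
  | nil => intro acc; rfl
  | cons s sample ih =>
    intro acc
    simp only [List.foldl_cons]
    rw [hstart, ih]

lemma pvSlice_min (xs : List Int) :
    PySem.List.slice xs none (some (min 10 (PySem.List.len xs))) = PySem.List.slice xs none (some 10) := by
  have hcast : (10 : Int) = ((10 : Nat) : Int) := by norm_num
  by_cases hlen : xs.length ≤ 10
  · have h1 : min (10 : Int) (PySem.List.len xs) = PySem.List.len xs := by
      simp only [PySem.List.len_eq]
      omega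
    rw [h1, PySem.List.len_eq, PySem.List.slice_to_natCast, List.take_length, hcast,
        PySem.List.slice_to_natCast, List.take_of_length_le hlen]
  · have h1 : min (10 : Int) (PySem.List.len xs) = 10 := by
      simp only [PySem.List.len_eq]
      omega
    rw [h1]

-- ===== VERDICT (by name: the statement is the Claim_ definition above) =====
theorem compute_path_lengths_py_spec : Claim_equal_compute_path_lengths_py := by
  intro n2e e2n _ _
  unfold Spec_compute_path_lengths_py compute_path_lengths_py compute_path_lengths_py_alt
  simp only
  rw [pvSlice_min, pvFoldStarts]
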